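-- pv_equiv track=rewrite | github.com/NicolaDeRenzis/NFT_NN_Receiver | code/auxCode/NeuralNetwork.py | arrangeIdx
-- ===== SOURCE A (Python) =====
-- import os, sys, math
--
-- def arrangeIdx(idx,cases,sweeper,nSimulations):
--
--     python_idx = idx-1
--     case_idx = 0
--     runningSum = 0
--
--     for c in cases:
--         oldRunningSum = runningSum;
--         runningSum += len(sweeper[c])
--         if python_idx < runningSum*nSimulations:
--             case = c
--             case_idx = python_idx-oldRunningSum*nSimulations
--             break
--
--     sweepIdx = int( math.floor(case_idx/nSimulations) )
--     python_idx = int(python_idx%nSimulations)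
--
--     return python_idx, sweepIdx, case_idx, case
-- ===== SOURCE B (Python) =====
-- import bisect
-- from itertools import accumulate
--
--
-- def arrangeIdx(idx, cases, sweeper, nSimulations):
--     python_idx = idx - 1
--     # prefix sums of the sweep lengths, one entry per case
--     cum = list(accumulate(len(sweeper[c]) for c in cases))
--     # binary search for the case whose block contains python_idx
--     i = bisect.bisect_right(cum, python_idx // nSimulations)
--     case = cases[i]
--     case_idx = python_idx - (cum[i - 1] if i else 0) * nSimulations
--     return python_idx % nSimulations, case_idx // nSimulations, case_idx, case
-- ===== Notes on version B (the rewrite author's own statement) =====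
-- stated objective: alternative
-- what changed: Replaces A's running-sum scan with early break by one itertools.accumulate prefix-sum pass followed by a bisect_right binary search for the matching case index; Pre_ restricts to the natural domain (nSimulations > 0, all case names present in sweeper, and an in-range index), outside which A raises or its value on a negative simulation count is an accident B does not reproduce.
-- outside the precondition, e.g. on arrangeIdx(1, ['a', 'b'], {'a': [1, 2]}, 3): A returns (0, 0, 0, 'a'), B raises KeyError; on arrangeIdx(-1, ['a'], {'a': [1]}, -1): A returns (0, 2, -2, 'a'), B raises IndexError
import Mathlib
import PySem

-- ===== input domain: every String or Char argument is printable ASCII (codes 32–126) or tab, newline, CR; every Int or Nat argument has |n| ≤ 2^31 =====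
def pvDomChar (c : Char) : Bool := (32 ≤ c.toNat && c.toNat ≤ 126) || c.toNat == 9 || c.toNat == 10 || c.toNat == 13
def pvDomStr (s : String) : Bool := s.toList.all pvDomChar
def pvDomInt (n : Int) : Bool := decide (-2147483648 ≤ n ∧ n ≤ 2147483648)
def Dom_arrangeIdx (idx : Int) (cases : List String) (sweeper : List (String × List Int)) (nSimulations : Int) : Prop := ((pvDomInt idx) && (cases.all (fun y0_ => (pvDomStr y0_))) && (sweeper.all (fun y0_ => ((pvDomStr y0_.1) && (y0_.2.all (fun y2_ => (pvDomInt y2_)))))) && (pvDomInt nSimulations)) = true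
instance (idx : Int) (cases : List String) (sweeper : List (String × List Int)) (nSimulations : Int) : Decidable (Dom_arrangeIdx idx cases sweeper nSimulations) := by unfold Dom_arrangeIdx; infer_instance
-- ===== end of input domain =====

-- B replaces A's running-sum scan by one prefix-sum pass plus a bisect (binary-search) lookup of the
-- case index; objective: alternative decomposition (same asymptotic cost).

-- shared helper: dict lookup sweeper[c] (assoc list, first match; none = KeyError)
def pvLookup (sweeper : List (String × List Int)) (c : String) : Option (List Int) :=
  (sweeper.find? (fun p => p.1 == c)).map (·.2)

-- ===== PORT A =====
-- the for-loop with break: state = runningSum; some (case_idx, case) on break,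
-- none when the loop falls through (Python: UnboundLocalError) or a key is missing (KeyError);
-- both none-paths are excluded by Pre_.
def arrangeIdxLoop (sweeper : List (String × List Int)) (n pidx : Int) :
    List String → Int → Option (Int × String)
  | [], _ => none
  | c :: rest, running =>
    match pvLookup sweeper c with
    | none => none
    | some l =>
      let running' := running + (l.length : Int)
      if pidx < running' * n then some (pidx - running * n, c)
      else arrangeIdxLoop sweeper n pidx rest running'

def arrangeIdx (idx : Int) (cases : List String) (sweeper : List (String × List Int)) (nSimulations : Int) : Int × Int × Int × String :=
  let pidx := idx - 1
  match arrangeIdxLoop sweeper nSimulations pidx cases 0 with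
  | some (case_idx, case) =>
    -- int(math.floor(case_idx/nSimulations)) = floor division; exact here since the float
    -- quotient of these bounded ints rounds to the same floor
    (PySem.Int.mod pidx nSimulations, PySem.Int.floordiv case_idx nSimulations, case_idx, case)
  | none => (0, 0, 0, "")  -- Python raises here; excluded by Pre_

-- ===== PORT B =====
-- list(accumulate(len(sweeper[c]) for c in cases)); missing key = Python KeyError, excluded by Pre_
def pvCum (sweeper : List (String × List Int)) : List String → Int → List Int
  | [], _ => []
  | c :: rest, run =>
    let run' := run + (((pvLookup sweeper c).getD []).length : Int)
    run' :: pvCum sweeper rest run'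

-- bisect.bisect_right on a sorted list = number of elements ≤ key
def pvBisectRight (xs : List Int) (k : Int) : Nat := xs.countP (fun a => decide (a ≤ k))

def arrangeIdx_alt (idx : Int) (cases : List String) (sweeper : List (String × List Int)) (nSimulations : Int) : Int × Int × Int × String :=
  let pidx := idx - 1
  let cum := pvCum sweeper cases 0
  let i : Nat := pvBisectRight cum (PySem.Int.floordiv pidx nSimulations)
  match cases[i]? with  -- cases[i] (i : Nat); none = IndexError, excluded by Pre_
  | some case =>
    let case_idx := pidx - (if 0 < i then cum.getD (i - 1) 0 else 0) * nSimulations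
    (PySem.Int.mod pidx nSimulations, PySem.Int.floordiv case_idx nSimulations, case_idx, case)
  | none => (0, 0, 0, "")  -- Python raises here; excluded by Pre_

-- ===== PRECONDITION & SPEC =====
def pvLens (sweeper : List (String × List Int)) (cases : List String) : List Int :=
  cases.map (fun c => (((pvLookup sweeper c).getD []).length : Int))

-- Pre_ restricts to the natural domain: nSimulations > 0 (zero raises ZeroDivisionError in A, and a
-- negative simulation count is malformed input on which A's value is accidental), the loop breaks at
-- some case (else A raises UnboundLocalError), and — slightly narrower than A, which only looks keys
-- up before its break — EVERY case name is a key of sweeper (B builds all prefix sums up front).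
def Pre_arrangeIdx (idx : Int) (cases : List String) (sweeper : List (String × List Int)) (nSimulations : Int) : Prop :=
  0 < nSimulations ∧ (∀ c ∈ cases, (pvLookup sweeper c).isSome) ∧
  ∃ i ∈ List.range cases.length, idx - 1 < ((pvLens sweeper cases).take (i + 1)).sum * nSimulations
instance (idx : Int) (cases : List String) (sweeper : List (String × List Int)) (nSimulations : Int) : Decidable (Pre_arrangeIdx idx cases sweeper nSimulations) := by unfold Pre_arrangeIdx; infer_instance

def pvWitness_arrangeIdx : Int × List String × (List (String × List Int)) × Int :=
  (3, ["a", "b"], [("a", [7, 8]), ("b", [9])], 2)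

def Spec_arrangeIdx (idx : Int) (cases : List String) (sweeper : List (String × List Int)) (nSimulations : Int) (out : Int × Int × Int × String) : Prop := out = arrangeIdx_alt idx cases sweeper nSimulations
instance (idx : Int) (cases : List String) (sweeper : List (String × List Int)) (nSimulations : Int) (out : Int × Int × Int × String) : Decidable (Spec_arrangeIdx idx cases sweeper nSimulations out) := by unfold Spec_arrangeIdx; infer_instance

-- ===== CLAIM (what is proved, stated in full; the proofs are below) =====
def Claim_equal_arrangeIdx : Prop := ∀ (idx : Int) (cases : List String) (sweeper : List (String × List Int)) (nSimulations : Int), Dom_arrangeIdx idx cases sweeper nSimulations → Pre_arrangeIdx idx cases sweeper nSimulations → Spec_arrangeIdx idx cases sweeper nSimulations (arrangeIdx idx cases sweeper nSimulations)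

-- ===== LEMMAS AND PROOFS =====

theorem pvCum_length (sweeper : List (String × List Int)) :
    ∀ (cs : List String) (r : Int), (pvCum sweeper cs r).length = cs.length := by
  intro cs; induction cs with
  | nil => intro r; rfl
  | cons c rest ih => intro r; simp [pvCum, ih]

theorem pvCum_le (sweeper : List (String × List Int)) :
    ∀ (cs : List String) (r : Int) (x : Int), x ∈ pvCum sweeper cs r → r ≤ x := by
  intro cs; induction cs with
  | nil => intro r x hx; simp [pvCum] at hx
  | cons c rest ih =>
    intro r x hx
    simp only [pvCum, List.mem_cons] at hx
    rcases hx with h | h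
    · omega
    · have := ih _ _ h; omega

theorem pvCum_sorted (sweeper : List (String × List Int)) :
    ∀ (cs : List String) (r : Int), (pvCum sweeper cs r).Pairwise (· ≤ ·) := by
  intro cs; induction cs with
  | nil => intro r; simp [pvCum]
  | cons c rest ih =>
    intro r
    simp only [pvCum]
    refine List.Pairwise.cons ?_ (ih _)
    intro x hx
    have := pvCum_le sweeper rest _ x hx
    omega

theorem pvCum_getD (sweeper : List (String × List Int)) :
    ∀ (cs : List String) (r : Int) (i : Nat), i < cs.length →
      (pvCum sweeper cs r).getD i 0 = r + ((pvLens sweeper cs).take (i + 1)).sum := by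
  intro cs; induction cs with
  | nil => intro r i hi; simp at hi
  | cons c rest ih =>
    intro r i hi
    cases i with
    | zero => simp [pvCum, pvLens]
    | succ j =>
      simp only [pvCum, pvLens, List.map_cons, List.take_succ_cons, List.sum_cons, List.getD_cons_succ]
      have hj : j < rest.length := by simpa using hi
      rw [ih _ j hj]
      simp [pvLens]; ring

-- bisect_right on a sorted list = index of the first element > key (= length if none)
theorem countP_le_eq_findIdx (k : Int) :
    ∀ (xs : List Int), xs.Pairwise (· ≤ ·) →
      xs.countP (fun a => decide (a ≤ k)) = xs.findIdx (fun a => decide (k < a)) := by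
  intro xs; induction xs with
  | nil => intro _; rfl
  | cons x rest ih =>
    intro hp
    rcases List.pairwise_cons.mp hp with ⟨hx, hrest⟩
    by_cases h : x ≤ k
    · rw [List.countP_cons, List.findIdx_cons]
      simp only [h, decide_true]
      have : ¬ (k < x) := by omega
      simp [this, ih hrest]
    · rw [List.countP_cons, List.findIdx_cons]
      have hk : k < x := by omega
      simp only [hk, decide_true, cond_true]
      have : rest.countP (fun a => decide (a ≤ k)) = 0 := by
        rw [List.countP_eq_zero]
        intro a ha
        have := hx a ha
        simp; omega
      simp [h, this]

-- A's loop, characterised through findIdx over the prefix-sum list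
theorem loopA_eq (sweeper : List (String × List Int)) (n pidx : Int) :
    ∀ (cs : List String) (r : Int), (∀ c ∈ cs, (pvLookup sweeper c).isSome) →
      arrangeIdxLoop sweeper n pidx cs r =
        if (pvCum sweeper cs r).findIdx (fun a => decide (pidx < a * n)) < cs.length then
          some (pidx -
            (if 0 < (pvCum sweeper cs r).findIdx (fun a => decide (pidx < a * n)) then
               (pvCum sweeper cs r).getD ((pvCum sweeper cs r).findIdx (fun a => decide (pidx < a * n)) - 1) 0
             else r) * n,
            cs.getD ((pvCum sweeper cs r).findIdx (fun a => decide (pidx < a * n))) "")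
        else none := by
  intro cs; induction cs with
  | nil => intro r _; simp [arrangeIdxLoop, pvCum]
  | cons c rest ih =>
    intro r hkeys
    have hc : (pvLookup sweeper c).isSome := hkeys c (by simp)
    obtain ⟨l, hl⟩ := Option.isSome_iff_exists.mp hc
    have hrest : ∀ c' ∈ rest, (pvLookup sweeper c').isSome := fun c' h => hkeys c' (by simp [h])
    simp only [arrangeIdxLoop, hl, Option.getD_some, pvCum]
    by_cases hbr : pidx < (r + (l.length : Int)) * n
    · rw [List.findIdx_cons]
      simp [hbr]
    · rw [if_neg hbr, List.findIdx_cons]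
      simp only [hbr, decide_false, cond_false]
      rw [ih _ hrest]
      generalize (pvCum sweeper rest (r + (l.length : Int))).findIdx (fun a => decide (pidx < a * n)) = j'
      by_cases hjl : j' < rest.length
      · have e1 : j' + 1 < (c :: rest).length := by simp; omega
        rw [if_pos hjl, if_pos e1]
        have e2 : (0:Nat) < j' + 1 := by omega
        rw [if_pos e2]
        congr 1
        cases j' with
        | zero => simp
        | succ m =>
          have e3 : (0:Nat) < m + 1 := by omega
          rw [if_pos e3]
          simp
      · have e1 : ¬ (j' + 1 < (c :: rest).length) := by simp; omega
        rw [if_neg hjl, if_neg e1]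

-- B's case index coincides with A's break index (the findIdx over the prefix sums)
theorem altIdx_eq (sweeper : List (String × List Int)) (cases : List String) (n pidx : Int)
    (hpos : 0 < n) :
    pvBisectRight (pvCum sweeper cases 0) (PySem.Int.floordiv pidx n)
    = (pvCum sweeper cases 0).findIdx (fun a => decide (pidx < a * n)) := by
  unfold pvBisectRight
  rw [countP_le_eq_findIdx _ _ (pvCum_sorted sweeper cases 0)]
  congr 1
  funext a
  congr 1
  rw [eq_iff_iff]
  exact PySem.Int.floordiv_lt_iff_lt_mul hpos

-- ===== VERDICT (by name: the statement is the Claim_ definition above) =====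
theorem arrangeIdx_spec : Claim_equal_arrangeIdx := by
  intro idx cases sweeper n _ hpre
  obtain ⟨hn, hkeys, i, hi, hbr⟩ := hpre
  rw [List.mem_range] at hi
  unfold Spec_arrangeIdx arrangeIdx arrangeIdx_alt
  simp only []
  rw [loopA_eq sweeper n (idx - 1) cases 0 hkeys,
      altIdx_eq sweeper cases n (idx - 1) hn]
  have hculen : (pvCum sweeper cases 0).length = cases.length := pvCum_length sweeper cases 0
  have hgetDi : (pvCum sweeper cases 0).getD i 0 = ((pvLens sweeper cases).take (i + 1)).sum := by
    have := pvCum_getD sweeper cases 0 i hi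
    simpa using this
  have hmem : (pvCum sweeper cases 0).getD i 0 ∈ pvCum sweeper cases 0 := by
    have hil : i < (pvCum sweeper cases 0).length := by omega
    rw [List.getD_eq_getElem _ 0 hil]
    exact List.getElem_mem hil
  have hjlt : (pvCum sweeper cases 0).findIdx (fun a => decide (idx - 1 < a * n)) < cases.length := by
    rw [← hculen]
    apply List.findIdx_lt_length_of_exists
    refine ⟨(pvCum sweeper cases 0).getD i 0, hmem, ?_⟩
    rw [hgetDi]
    exact decide_eq_true hbr
  rw [if_pos hjlt]
  have hget : cases[(pvCum sweeper cases 0).findIdx (fun a => decide (idx - 1 < a * n))]?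
      = some (cases.getD ((pvCum sweeper cases 0).findIdx (fun a => decide (idx - 1 < a * n))) "") := by
    rw [List.getD_eq_getElem cases "" hjlt, List.getElem?_eq_getElem hjlt]
  rw [hget]
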